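-- pv_equiv track=rewrite | github.com/pyccel/pyccel | tests/epyccel/modules/loops.py | fizzbuzz_sum_with_continue
-- ===== SOURCE A (Python) =====
-- def fizzbuzz_sum_with_continue(fizz : int, buzz : int, max_val : int):
--     fizzbuzz_sum = 0
--     for i in range(1,max_val+1):
--         if i%fizz != 0:
--             continue
--         if i%buzz != 0:
--             continue
--         fizzbuzz_sum += i
--     return fizzbuzz_sum
-- ===== SOURCE B (Python) =====
-- def fizzbuzz_sum_with_continue(fizz: int, buzz: int, max_val: int):
--     # Closed form: the summed i are exactly the positive multiples of
--     # lcm(|fizz|, |buzz|) up to max_val; sum them with the arithmetic series.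
--     def gcd(a, b):
--         return a if b == 0 else gcd(b, a % b)
--     f = abs(fizz)
--     b = abs(buzz)
--     l = f * b // gcd(f, b)
--     n = max_val // l if max_val > 0 else 0
--     return l * n * (n + 1) // 2
-- ===== Notes on version B (the rewrite author's own statement) =====
-- stated objective: faster
-- what changed: Replaced the O(max_val) scan testing each i for divisibility by a closed-form arithmetic-series formula over the multiples of lcm(|fizz|,|buzz|).
-- outside the precondition, e.g. on fizzbuzz_sum_with_continue(0, 0, 0): A returns 0, B raises ZeroDivisionError; on fizzbuzz_sum_with_continue(0, 3, 0): A returns 0, B returns 0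
import Mathlib
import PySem

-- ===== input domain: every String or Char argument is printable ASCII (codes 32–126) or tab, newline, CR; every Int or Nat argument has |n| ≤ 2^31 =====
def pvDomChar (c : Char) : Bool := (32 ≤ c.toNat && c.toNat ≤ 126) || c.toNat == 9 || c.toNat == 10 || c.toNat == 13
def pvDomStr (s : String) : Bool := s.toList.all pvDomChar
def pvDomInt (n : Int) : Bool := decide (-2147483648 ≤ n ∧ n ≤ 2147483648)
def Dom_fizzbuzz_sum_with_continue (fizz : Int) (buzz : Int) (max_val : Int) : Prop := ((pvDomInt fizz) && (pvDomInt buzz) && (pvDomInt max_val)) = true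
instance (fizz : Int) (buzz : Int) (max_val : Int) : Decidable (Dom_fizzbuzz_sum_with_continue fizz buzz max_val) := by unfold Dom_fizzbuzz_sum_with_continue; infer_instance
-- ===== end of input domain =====

-- B replaces A's O(max_val) divisibility scan by the closed-form arithmetic series
-- over the multiples of lcm(|fizz|, |buzz|) (objective: faster, asymptotic).

-- ===== PORT A =====
def fizzbuzz_sum_with_continue (fizz : Int) (buzz : Int) (max_val : Int) : Int :=
  (PySem.List.pyRange 1 (max_val + 1) 1).foldl
    (fun fizzbuzz_sum i =>
      if PySem.Int.mod i fizz ≠ 0 then fizzbuzz_sum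
      else if PySem.Int.mod i buzz ≠ 0 then fizzbuzz_sum
      else fizzbuzz_sum + i) 0

-- ===== PORT B =====
-- Source B's recursive Euclidean gcd helper (its arguments are the nonnegative abs values)
def pvGcdB (a b : Nat) : Nat :=
  if h : b = 0 then a else pvGcdB b (a % b)
termination_by b
decreasing_by exact Nat.mod_lt _ (Nat.pos_of_ne_zero h)

def fizzbuzz_sum_with_continue_alt (fizz : Int) (buzz : Int) (max_val : Int) : Int :=
  let f : Nat := fizz.natAbs
  let b : Nat := buzz.natAbs
  let l : Int := ((f * b / pvGcdB f b : Nat) : Int)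
  let n : Int := if max_val > 0 then PySem.Int.floordiv max_val l else 0
  PySem.Int.floordiv (l * n * (n + 1)) 2

-- ===== PRECONDITION & SPEC =====
-- Pre_ excludes fizz = 0 or buzz = 0: there A raises ZeroDivisionError whenever
-- max_val ≥ 1 (the loop body runs), and B's lcm computation divides by zero too.
def Pre_fizzbuzz_sum_with_continue (fizz : Int) (buzz : Int) (max_val : Int) : Prop :=
  fizz ≠ 0 ∧ buzz ≠ 0
instance (fizz : Int) (buzz : Int) (max_val : Int) : Decidable (Pre_fizzbuzz_sum_with_continue fizz buzz max_val) := by unfold Pre_fizzbuzz_sum_with_continue; infer_instance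

def pvWitness_fizzbuzz_sum_with_continue : Int × Int × Int := (3, 5, 20)

def Spec_fizzbuzz_sum_with_continue (fizz : Int) (buzz : Int) (max_val : Int) (out : Int) : Prop := out = fizzbuzz_sum_with_continue_alt fizz buzz max_val
instance (fizz : Int) (buzz : Int) (max_val : Int) (out : Int) : Decidable (Spec_fizzbuzz_sum_with_continue fizz buzz max_val out) := by unfold Spec_fizzbuzz_sum_with_continue; infer_instance

-- ===== CLAIM (what is proved, stated in full; the proofs are below) =====
def Claim_equal_fizzbuzz_sum_with_continue : Prop := ∀ (fizz : Int) (buzz : Int) (max_val : Int), Dom_fizzbuzz_sum_with_continue fizz buzz max_val → Pre_fizzbuzz_sum_with_continue fizz buzz max_val → Spec_fizzbuzz_sum_with_continue fizz buzz max_val (fizzbuzz_sum_with_continue fizz buzz max_val)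

-- ===== LEMMAS AND PROOFS =====

lemma pvGcdB_eq_gcd (a b : Nat) : pvGcdB a b = Nat.gcd a b := by
  induction b using Nat.strong_induction_on generalizing a with
  | _ b ih =>
    unfold pvGcdB
    split
    · simp [*]
    · rename_i h
      rw [ih (a % b) (Nat.mod_lt _ (Nat.pos_of_ne_zero h)) b]
      rw [Nat.gcd_comm b (a % b), ← Nat.gcd_rec b a, Nat.gcd_comm]

-- the summed index set is exactly the multiples of lcm
lemma cond_iff_lcm_dvd (fizz buzz i : Int) :
    ((Int.lcm fizz buzz : Int)) ∣ i ↔ (fizz ∣ i ∧ buzz ∣ i) := by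
  rw [Int.coe_lcm]
  constructor
  · intro h
    exact ⟨dvd_trans (dvd_lcm_left _ _) h, dvd_trans (dvd_lcm_right _ _) h⟩
  · rintro ⟨h1, h2⟩
    exact lcm_dvd h1 h2

-- closed form: twice the partial sum of positive multiples of L up to m
lemma twice_sum_eq (L : Int) (hL : 0 < L) (m : Int) (hm : 0 ≤ m) :
    2 * (PySem.List.pyRange 1 (m + 1) 1).foldl
          (fun s i => if L ∣ i then s + i else s) 0
      = L * (m / L) * (m / L + 1) := by
  induction m, hm using Int.le_induction with
  | base =>
      rw [PySem.List.pyRange_one_eq_nil (by omega)]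
      simp
  | succ m hm0 ih =>
      rw [PySem.List.pyRange_one_succ_right (by omega), List.foldl_append]
      simp only [List.foldl_cons, List.foldl_nil]
      by_cases hd : L ∣ (m + 1)
      · obtain ⟨q, hq⟩ := hd
        have hq1 : 1 ≤ q := by nlinarith
        have hn' : (m + 1) / L = q := by rw [hq, Int.mul_ediv_cancel_left _ (by omega)]
        have hn : m / L = q - 1 := by
          have : m = (L - 1) + L * (q - 1) := by linarith [hq]
          rw [this, Int.add_mul_ediv_left _ _ (show L ≠ 0 by omega),
              Int.ediv_eq_zero_of_lt (by omega) (by omega)]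
          ring
        rw [if_pos ⟨q, hq⟩]
        rw [mul_add, ih, hn, hn']
        ring_nf
        nlinarith [hq]
      · have hr := Int.emod_nonneg (m + 1) (show L ≠ 0 by omega)
        have hr2 := Int.emod_lt_of_pos (m + 1) hL
        have hrne : (m + 1) % L ≠ 0 := fun h => hd (Int.dvd_of_emod_eq_zero h)
        have hn : m / L = (m + 1) / L := by
          set n' := (m + 1) / L with hn'
          set r := (m + 1) % L with hrr
          have hm_eq : m = (r - 1) + L * n' := by
            have := Int.mul_ediv_add_emod (m + 1) L
            linarith
          rw [hm_eq, Int.add_mul_ediv_left _ _ (show L ≠ 0 by omega),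
              Int.ediv_eq_zero_of_lt (by omega) (by omega)]
          ring
        rw [if_neg (fun h => hd h)]
        rw [ih, hn]

lemma foldl_cond_eq (fizz buzz : Int) (xs : List Int) (s : Int) :
    xs.foldl (fun fizzbuzz_sum i =>
        if PySem.Int.mod i fizz ≠ 0 then fizzbuzz_sum
        else if PySem.Int.mod i buzz ≠ 0 then fizzbuzz_sum
        else fizzbuzz_sum + i) s
      = xs.foldl (fun s i => if ((Int.lcm fizz buzz : Int)) ∣ i then s + i else s) s := by
  congr 1
  funext s i
  by_cases h1 : fizz ∣ i
  · by_cases h2 : buzz ∣ i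
    · rw [if_neg (by simp [PySem.Int.mod_eq_zero_iff_dvd, h1]),
          if_neg (by simp [PySem.Int.mod_eq_zero_iff_dvd, h2]),
          if_pos ((cond_iff_lcm_dvd fizz buzz i).2 ⟨h1, h2⟩)]
    · rw [if_neg (by simp [PySem.Int.mod_eq_zero_iff_dvd, h1]),
          if_pos (by simp [PySem.Int.mod_eq_zero_iff_dvd, h2]),
          if_neg (fun h => h2 ((cond_iff_lcm_dvd fizz buzz i).1 h).2)]
  · rw [if_pos (by simp [PySem.Int.mod_eq_zero_iff_dvd, h1]),
        if_neg (fun h => h1 ((cond_iff_lcm_dvd fizz buzz i).1 h).1)]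

-- ===== VERDICT (by name: the statement is the Claim_ definition above) =====
theorem fizzbuzz_sum_with_continue_spec : Claim_equal_fizzbuzz_sum_with_continue := by
  intro fizz buzz max_val _ hpre
  obtain ⟨hf, hb⟩ := hpre
  unfold Spec_fizzbuzz_sum_with_continue fizzbuzz_sum_with_continue
  simp only [fizzbuzz_sum_with_continue_alt]
  have hlcm : ((fizz.natAbs * buzz.natAbs / pvGcdB fizz.natAbs buzz.natAbs : Nat) : Int)
      = (Int.lcm fizz buzz : Int) := by
    rw [pvGcdB_eq_gcd]
    rfl
  set L : Int := (Int.lcm fizz buzz : Int) with hLdef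
  have hLpos : 0 < L := by
    have h0 : Int.lcm fizz buzz ≠ 0 :=
      Nat.lcm_ne_zero (Int.natAbs_ne_zero.2 hf) (Int.natAbs_ne_zero.2 hb)
    rw [hLdef]
    exact_mod_cast Nat.pos_of_ne_zero h0
  rw [foldl_cond_eq, hlcm]
  by_cases hm : max_val > 0
  · rw [if_pos hm, PySem.Int.floordiv_eq_ediv_of_pos hLpos,
        PySem.Int.floordiv_eq_ediv_of_pos (by omega : (0:Int) < 2)]
    have h2 := twice_sum_eq L hLpos max_val (by omega)
    rw [← h2, Int.mul_ediv_cancel_left _ (by omega : (2:Int) ≠ 0)]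
  · rw [if_neg hm, PySem.List.pyRange_one_eq_nil (by omega)]
    simp
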